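-- pv_equiv track=rewrite | github.com/Guyitaoo/review-analysis | scripts/word_frequency_doc_freq_by_pos.py | extract_word_pos_from_tags
-- ===== SOURCE A (Python) =====
-- from collections import Counter
-- from typing import Dict, List, Tuple
--
-- def extract_word_pos_from_tags(pos_tags: List[Tuple[str, str]], clean_tokens_set: set) -> Dict[str, str]:
--     """
--     从 pos_tags 中提取每个词对应的词性，只保留在 clean_tokens 中出现的词。
--
--     参数:
--         pos_tags: 词性标注列表 [(词, 词性), ...]
--         clean_tokens_set: clean_tokens 中所有词的集合
--
--     返回:
--         word_pos: 字典，{词: 最常见的词性}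
--     """
--     word_pos_counter = Counter()
--
--     for word, pos in pos_tags:
--         if word in clean_tokens_set:  # 只保留在 clean_tokens 中的词
--             word_pos_counter[(word, pos)] += 1
--
--     # 为每个词选择最常见的词性
--     word_pos = {}
--     word_pos_temp = {}  # {词: Counter({词性: 出现次数})}
--
--     for (word, pos), count in word_pos_counter.items():
--         if word not in word_pos_temp:
--             word_pos_temp[word] = Counter()
--         word_pos_temp[word][pos] += count
--
--     for word, pos_counter in word_pos_temp.items():
--         most_common_pos = pos_counter.most_common(1)[0][0]
--         word_pos[word] = most_common_pos
--
--     return word_pos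
-- ===== SOURCE B (Python) =====
-- def extract_word_pos_from_tags(pos_tags, clean_tokens_set):
--     """Brute-force scan version: filter once, then for each word (first occurrence
--     order) pick the POS maximizing its count in that word's POS list; Python's max
--     returns the first maximal element, which matches Counter.most_common's
--     insertion-order tie-break. No Counter / nested counters at all."""
--     pairs = [(w, p) for w, p in pos_tags if w in clean_tokens_set]
--     result = {}
--     for w, _ in pairs:
--         if w not in result:
--             ps = [q for x, q in pairs if x == w]
--             result[w] = max(ps, key=ps.count)
--     return result
-- ===== Notes on version B (the rewrite author's own statement) =====
-- stated objective: alternative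
-- what changed: B drops all Counter/dict aggregation: it filters the tag list once, then for each word (in first-occurrence order) rescans the filtered list for that word's POS list and takes max(ps, key=ps.count), whose first-maximal rule reproduces most_common's tie-break; it trades A's hash-counter pipeline for plain nested list scans.
import Mathlib
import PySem

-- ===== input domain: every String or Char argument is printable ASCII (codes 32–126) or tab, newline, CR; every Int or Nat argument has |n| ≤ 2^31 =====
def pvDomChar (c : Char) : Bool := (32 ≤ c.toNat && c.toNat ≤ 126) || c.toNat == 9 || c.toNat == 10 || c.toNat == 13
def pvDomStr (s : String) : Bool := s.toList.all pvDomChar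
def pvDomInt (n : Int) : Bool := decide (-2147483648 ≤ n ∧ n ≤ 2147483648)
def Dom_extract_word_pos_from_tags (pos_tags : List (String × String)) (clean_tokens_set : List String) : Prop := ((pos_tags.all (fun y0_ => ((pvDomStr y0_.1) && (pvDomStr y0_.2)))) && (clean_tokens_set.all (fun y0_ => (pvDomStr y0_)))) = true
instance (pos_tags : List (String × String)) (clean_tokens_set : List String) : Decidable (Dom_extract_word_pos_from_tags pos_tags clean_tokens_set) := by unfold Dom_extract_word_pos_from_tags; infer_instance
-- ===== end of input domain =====

-- B replaces A's Counter/nested-counter aggregation by plain nested list scans: filter once,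
-- then per word (first-occurrence order) pick the first count-maximal POS from a rescan.

-- ===== PORT A =====
-- most_common(1) is the descending stable sort of the counter's items, first entry; every
-- counter stored in word_pos_temp is nonempty, so headD's default pair is never used.
def extract_word_pos_from_tags (pos_tags : List (String × String)) (clean_tokens_set : List String) : List (String × String) :=
  let word_pos_counter : PySem.Dict (String × String) Int :=
    pos_tags.foldl (fun d wp => if wp.1 ∈ clean_tokens_set then d.modify wp 0 (· + 1) else d) PySem.Dict.empty
  let word_pos_temp : PySem.Dict String (PySem.Dict String Int) :=
    word_pos_counter.items.foldl (fun t x =>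
      let t1 := if t.contains x.1.1 then t else t.insert x.1.1 PySem.Dict.empty
      t1.modify x.1.1 PySem.Dict.empty (fun c => c.modify x.1.2 0 (· + x.2))) PySem.Dict.empty
  let word_pos : PySem.Dict String String :=
    word_pos_temp.items.foldl (fun acc x =>
      acc.insert x.1 (((PySem.List.sorted x.2.items (fun p => p.2) true).headD ("", 0)).1)) PySem.Dict.empty
  word_pos.items

-- ===== PORT B =====
-- the two comprehensions are filters/maps; max(ps, key=ps.count) is PySem.List.max?
-- (first maximal element, Python's max rule); ps is never empty where it is taken,
-- so the "" default of getD is never used.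
def extract_word_pos_from_tags_alt (pos_tags : List (String × String)) (clean_tokens_set : List String) : List (String × String) :=
  let pairs := pos_tags.filter (fun wp => wp.1 ∈ clean_tokens_set)
  let result : PySem.Dict String String :=
    pairs.foldl (fun r wp =>
      if r.contains wp.1 then r
      else
        let ps := (pairs.filter (fun x => x.1 == wp.1)).map (·.2)
        r.insert wp.1 ((PySem.List.max? ps (fun p => (ps.count p : Int))).getD "")) PySem.Dict.empty
  result.items

-- ===== PRECONDITION & SPEC =====
def Spec_extract_word_pos_from_tags (pos_tags : List (String × String)) (clean_tokens_set : List String) (out : List (String × String)) : Prop := out = extract_word_pos_from_tags_alt pos_tags clean_tokens_set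
instance (pos_tags : List (String × String)) (clean_tokens_set : List String) (out : List (String × String)) : Decidable (Spec_extract_word_pos_from_tags pos_tags clean_tokens_set out) := by unfold Spec_extract_word_pos_from_tags; infer_instance

-- ===== CLAIM (what is proved, stated in full; the proofs are below) =====
def Claim_equal_extract_word_pos_from_tags : Prop := ∀ (pos_tags : List (String × String)) (clean_tokens_set : List String), Dom_extract_word_pos_from_tags pos_tags clean_tokens_set → Spec_extract_word_pos_from_tags pos_tags clean_tokens_set (extract_word_pos_from_tags pos_tags clean_tokens_set)

-- ===== LEMMAS AND PROOFS =====

theorem pvOfListMapOfList {α β : Type} [BEq α] [LawfulBEq α] [BEq β] [LawfulBEq β]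
    (f : α → β) (l : List α) :
    PySem.Set.ofList ((PySem.Set.ofList l).map f) = PySem.Set.ofList (l.map f) := by
  induction l using List.reverseRecOn with
  | nil => rfl
  | append_singleton xs x ih =>
    rw [PySem.Set.ofList_append_singleton]
    by_cases h : x ∈ xs
    · rw [PySem.Set.add_of_mem ((PySem.Set.mem_ofList xs x).mpr h), ih,
        List.map_append, List.map_singleton, PySem.Set.ofList_append_singleton,
        PySem.Set.add_of_mem ((PySem.Set.mem_ofList _ _).mpr (List.mem_map_of_mem h))]
    · rw [PySem.Set.add_of_not_mem (fun hm => h ((PySem.Set.mem_ofList xs x).mp hm)),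
        List.map_append, List.map_singleton, PySem.Set.ofList_append_singleton, ih,
        List.map_append, List.map_singleton, PySem.Set.ofList_append_singleton]

theorem pvOfListFilter {α : Type} [BEq α] [LawfulBEq α] (p : α → Bool) (l : List α) :
    (PySem.Set.ofList l).filter p = PySem.Set.ofList (l.filter p) := by
  induction l using List.reverseRecOn with
  | nil => rfl
  | append_singleton xs x ih =>
    rw [PySem.Set.ofList_append_singleton, List.filter_append]
    by_cases h : x ∈ xs
    · rw [PySem.Set.add_of_mem ((PySem.Set.mem_ofList xs x).mpr h), ih]
      by_cases hp : p x = true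
      · simp only [List.filter_singleton, hp, cond_true]
        rw [PySem.Set.ofList_append_singleton,
          PySem.Set.add_of_mem ((PySem.Set.mem_ofList _ _).mpr (List.mem_filter.mpr ⟨h, hp⟩))]
      · simp [hp]
    · rw [PySem.Set.add_of_not_mem (fun hm => h ((PySem.Set.mem_ofList xs x).mp hm)),
        List.filter_append, ih]
      by_cases hp : p x = true
      · simp only [List.filter_singleton, hp, cond_true]
        rw [PySem.Set.ofList_append_singleton,
          PySem.Set.add_of_not_mem (fun hm => h (List.mem_of_mem_filter ((PySem.Set.mem_ofList _ _).mp hm)))]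
      · simp [hp]

theorem pvOfListMapInj {α β : Type} [BEq α] [LawfulBEq α] [BEq β] [LawfulBEq β]
    (f : α → β) (hf : Function.Injective f) (l : List α) :
    PySem.Set.ofList (l.map f) = (PySem.Set.ofList l).map f := by
  induction l using List.reverseRecOn with
  | nil => rfl
  | append_singleton xs x ih =>
    rw [List.map_append, List.map_singleton, PySem.Set.ofList_append_singleton, ih,
      PySem.Set.ofList_append_singleton]
    by_cases h : x ∈ xs
    · rw [PySem.Set.add_of_mem ((PySem.Set.mem_ofList xs x).mpr h),
        PySem.Set.add_of_mem (List.mem_map_of_mem ((PySem.Set.mem_ofList xs x).mpr h))]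
    · have hx : f x ∉ (PySem.Set.ofList xs).map f := by
        intro hm
        obtain ⟨a, ha, hfa⟩ := List.mem_map.mp hm
        exact h (hf hfa ▸ (PySem.Set.mem_ofList xs a).mp ha)
      rw [PySem.Set.add_of_not_mem (fun hm => h ((PySem.Set.mem_ofList xs x).mp hm)),
        PySem.Set.add_of_not_mem hx, List.map_append, List.map_singleton]

theorem pvGroup {β κ ν : Type} [BEq κ] [LawfulBEq κ] [DecidableEq κ]
    (k : β → κ) (d0 : ν) (f : β → ν → ν) (w : κ) :
    ∀ (l : List β) (d : PySem.Dict κ ν),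
    (l.foldl (fun d x => d.modify (k x) d0 (f x)) d).getD w d0 =
      (l.filter (fun x => k x == w)).foldl (fun v x => f x v) (d.getD w d0) := by
  intro l
  induction l with
  | nil => intro d; rfl
  | cons x xs ih =>
    intro d
    rw [List.foldl_cons, ih, List.filter_cons]
    by_cases hk : k x = w
    · simp only [hk, beq_self_eq_true, if_pos, List.foldl_cons,
        PySem.Dict.getD_modify]
    · have : (k x == w) = false := beq_eq_false_iff_ne.mpr hk
      simp only [this, Bool.false_eq_true, PySem.Dict.getD_modify]
      rw [if_neg (fun hw => hk hw.symm)]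
      simp

theorem pvFresh {κ : Type} [BEq κ] [LawfulBEq κ] (cnt : κ → Int) :
    ∀ (qs : List κ) (d : PySem.Dict κ Int), qs.Nodup → (∀ q ∈ qs, d.contains q = false) →
    (qs.foldl (fun c q => c.modify q 0 (· + cnt q)) d).items =
      d.items ++ qs.map (fun q => (q, 0 + cnt q)) := by
  intro qs
  induction qs with
  | nil => intro d _ _; simp
  | cons q qs ih =>
    intro d hnd hf
    have hq : d.contains q = false := hf q (List.mem_cons_self)
    have step : d.modify q 0 (· + cnt q) = d.insert q (0 + cnt q) := by
      show d.insert q (d.getD q 0 + cnt q) = _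
      rw [PySem.Dict.getD_of_not_contains d 0 hq]
    rw [List.foldl_cons, step, ih _ (List.nodup_cons.mp hnd).2 ?_ ,
      PySem.Dict.items_insert_of_not_contains _ _ hq]
    · simp
    · intro q' hq'
      rw [PySem.Dict.contains_insert]
      have : q' ≠ q := fun e => (List.nodup_cons.mp hnd).1 (e ▸ hq')
      simp [this, hf q' (List.mem_cons_of_mem _ hq')]

theorem pvHeadInsertBy {α : Type} (before : α → α → Bool) (x : α) (acc : List α) :
    (PySem.List.insertBy before x acc).head? =
      some (match acc with | [] => x | y :: _ => if before x y then x else y) := by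
  cases acc with
  | nil => rfl
  | cons y ys =>
    show (if before x y then x :: y :: ys else y :: PySem.List.insertBy before x ys).head? = _
    by_cases h : before x y <;> simp [h]

theorem pvHeadFoldInsertBy {α : Type} (before : α → α → Bool) :
    ∀ (xs : List α) (acc : List α),
    (xs.foldl (fun a x => PySem.List.insertBy before x a) acc).head? =
      xs.foldl (fun m x => match m with
        | none => some x
        | some y => if before x y then some x else some y) acc.head? := by
  intro xs
  induction xs with
  | nil => intro acc; rfl
  | cons x xs ih =>
    intro acc
    rw [List.foldl_cons, List.foldl_cons, ih]
    congr 1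
    rw [pvHeadInsertBy]
    cases acc with
    | nil => rfl
    | cons y ys =>
      show _ = if before x y then some x else some y
      by_cases h : before x y <;> simp [h]

theorem pvHeadSortedRev {α κ : Type} [LT κ] [DecidableLT κ] (xs : List α) (key : α → κ) :
    (PySem.List.sorted xs key true).head? = PySem.List.max? xs key := by
  rw [PySem.List.sorted_rev_eq_foldl_insertBy, pvHeadFoldInsertBy]
  show _ = List.foldl _ ([] : List α).head? xs
  congr 1
  funext m x
  cases m with
  | none => rfl
  | some y => simp only [decide_eq_true_eq]

theorem pvMaxMap {α β κ : Type} [LT κ] [DecidableLT κ] (f : α → β) (g : β → κ) (xs : List α) :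
    PySem.List.max? (xs.map f) g = (PySem.List.max? xs (fun a => g (f a))).map f := by
  have aux : ∀ (xs : List α) (acc : Option α),
      List.foldl (fun m a => match m with
        | none => some (f a)
        | some m' => if g m' < g (f a) then some (f a) else some m') (acc.map f) xs
      = Option.map f (List.foldl (fun m a => match m with
        | none => some a
        | some m' => if g (f m') < g (f a) then some a else some m') acc xs) := by
    intro xs
    induction xs with
    | nil => intro acc; rfl
    | cons x xs ih =>
      intro acc
      rw [List.foldl_cons, List.foldl_cons, ← ih]
      congr 1
      cases acc with
      | none => rfl
      | some y => by_cases h : g (f y) < g (f x) <;> simp [h]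
  show List.foldl _ none (xs.map f) = Option.map f (List.foldl _ none xs)
  rw [List.foldl_map]
  exact aux xs none

-- most_common(1)[0][0] equals the first count-maximal key of a nonempty unique-key dict
theorem pvMCMax (c : PySem.Dict String Int) (hnd : c.keys.Nodup) (hne : c.items ≠ []) :
    ((PySem.List.sorted c.items (fun p => p.2) true).headD ("", 0)).1 =
      (PySem.List.max? c.keys (fun k => c.getD k 0)).getD "" := by
  have hk : c.keys ≠ [] := by
    rw [PySem.Dict.keys.eq_1]
    exact fun h => hne (List.map_eq_nil_iff.mp h)
  obtain ⟨m, hm⟩ : ∃ m, PySem.List.max? c.keys (fun k => c.getD k 0) = some m := by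
    cases h : PySem.List.max? c.keys (fun k => c.getD k 0) with
    | none => exact absurd ((PySem.List.max?_eq_none_iff _ _).mp h) hk
    | some m => exact ⟨m, rfl⟩
  have hhead : (PySem.List.sorted c.items (fun p => p.2) true).head? =
      some (m, c.getD m 0) := by
    rw [pvHeadSortedRev, PySem.Dict.items_eq_map_keys c hnd 0, pvMaxMap]
    rw [hm]
    rfl
  cases hs : PySem.List.sorted c.items (fun p => p.2) true with
  | nil => rw [hs] at hhead; exact absurd hhead (by simp)
  | cons a t =>
    rw [hs] at hhead
    simp only [List.head?_cons, Option.some.injEq] at hhead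
    rw [List.headD_cons, hhead, hm]
    rfl

-- the value at w of the nested grouping fold is the counter of w's POS list
theorem pvAVal (l : List (String × String)) (w : String) :
    (l.foldl (fun d wp => d.modify wp.1 PySem.Dict.empty (fun c => c.modify wp.2 0 (· + 1)))
        PySem.Dict.empty).getD w PySem.Dict.empty =
      PySem.Dict.counter ((l.filter (fun x => x.1 == w)).map (·.2)) := by
  rw [pvGroup (fun wp => wp.1) PySem.Dict.empty (fun wp c => c.modify wp.2 0 (· + 1)) w l
      PySem.Dict.empty, PySem.Dict.getD_empty, PySem.Dict.counter_eq_foldl, List.foldl_map]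

-- A's re-aggregation of the flat counter equals the one-pass nested grouping fold
theorem pvMid (l : List (String × String)) :
    (PySem.Dict.counter l).items.foldl
        (fun t x => t.modify x.1.1 PySem.Dict.empty (fun c => c.modify x.1.2 0 (· + x.2)))
        PySem.Dict.empty =
      l.foldl (fun d wp => d.modify wp.1 PySem.Dict.empty (fun c => c.modify wp.2 (0 : Int) (· + 1)))
        PySem.Dict.empty := by
  have ndA : ((PySem.Dict.counter l).items.foldl
      (fun t x => t.modify x.1.1 PySem.Dict.empty (fun c => c.modify x.1.2 0 (· + x.2)))
      PySem.Dict.empty).keys.Nodup :=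
    PySem.Dict.nodup_keys_foldl_modify_key (PySem.Dict.counter l).items
      (fun x => x.1.1) PySem.Dict.empty (fun _ x c => c.modify x.1.2 0 (· + x.2))
      PySem.Dict.empty PySem.Dict.nodup_keys_empty
  have ndB : (l.foldl
      (fun d wp => d.modify wp.1 PySem.Dict.empty (fun c => c.modify wp.2 (0 : Int) (· + 1)))
      PySem.Dict.empty).keys.Nodup :=
    PySem.Dict.nodup_keys_foldl_modify_key l
      (fun wp => wp.1) PySem.Dict.empty (fun _ wp c => c.modify wp.2 (0 : Int) (· + 1))
      PySem.Dict.empty PySem.Dict.nodup_keys_empty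
  have kA : ((PySem.Dict.counter l).items.foldl
      (fun t x => t.modify x.1.1 PySem.Dict.empty (fun c => c.modify x.1.2 0 (· + x.2)))
      PySem.Dict.empty).keys
      = PySem.Set.update PySem.Dict.empty.keys ((PySem.Dict.counter l).items.map (fun x => x.1.1)) :=
    PySem.Dict.keys_foldl_modify_key (PySem.Dict.counter l).items
      (fun x => x.1.1) PySem.Dict.empty (fun _ x c => c.modify x.1.2 0 (· + x.2)) PySem.Dict.empty
  have kB : (l.foldl
      (fun d wp => d.modify wp.1 PySem.Dict.empty (fun c => c.modify wp.2 (0 : Int) (· + 1)))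
      PySem.Dict.empty).keys
      = PySem.Set.update PySem.Dict.empty.keys (l.map (fun wp => wp.1)) :=
    PySem.Dict.keys_foldl_modify_key l
      (fun wp => wp.1) PySem.Dict.empty (fun _ wp c => c.modify wp.2 (0 : Int) (· + 1)) PySem.Dict.empty
  rw [PySem.Dict.keys_empty, PySem.Set.update_nil_left] at kA kB
  conv at kA => rhs; rw [PySem.Dict.items_counter, List.map_map]
  rw [show ((fun (x : (String × String) × Int) => x.1.1) ∘
      (fun k => (k, (List.count k l : Int)))) = (fun k : String × String => k.1) from rfl,
    pvOfListMapOfList (fun p : String × String => p.1) l] at kA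
  have vA : ∀ w : String,
      ((PySem.Dict.counter l).items.foldl
        (fun t x => t.modify x.1.1 PySem.Dict.empty (fun c => c.modify x.1.2 0 (· + x.2)))
        PySem.Dict.empty).getD w PySem.Dict.empty =
      PySem.Dict.counter ((l.filter (fun x => x.1 == w)).map (·.2)) := by
    intro w
    have hinj : Function.Injective (fun q : String => (w, q)) := by
      intro a b h
      exact ((Prod.mk.injEq w a w b).mp h).2
    rw [pvGroup (fun x => x.1.1) PySem.Dict.empty (fun x c => c.modify x.1.2 0 (· + x.2)) w
        (PySem.Dict.counter l).items PySem.Dict.empty,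
      PySem.Dict.getD_empty, PySem.Dict.items_counter, List.filter_map]
    rw [show ((fun (x : (String × String) × Int) => x.1.1 == w) ∘
        (fun k => (k, (List.count k l : Int)))) = (fun k : String × String => k.1 == w) from rfl,
      pvOfListFilter (fun k : String × String => k.1 == w) l]
    have hlw : l.filter (fun x => x.1 == w)
        = ((l.filter (fun x => x.1 == w)).map (·.2)).map (fun q => (w, q)) := by
      rw [List.map_map]
      symm
      have h1 : ∀ x ∈ l.filter (fun x => x.1 == w),
          ((fun q => (w, q)) ∘ (·.2)) x = id x := by
        intro x hx
        obtain ⟨_, hp⟩ := List.mem_filter.mp hx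
        have h1 : x.1 = w := by simpa using hp
        show (w, x.2) = x
        rw [← h1]
      rw [List.map_congr_left h1, List.map_id]
    have hcnt : ∀ q : String, List.count (w, q) l
        = List.count q ((l.filter (fun x => x.1 == w)).map (·.2)) := by
      intro q
      have h1 : List.count (w, q) (l.filter (fun x => x.1 == w)) = List.count (w, q) l :=
        List.count_filter (by simp)
      rw [← h1]
      conv_lhs => rw [hlw]
      exact List.count_map_of_injective ((l.filter (fun x => x.1 == w)).map (·.2))
        (fun q => (w, q)) hinj q
    conv_lhs => rw [hlw]
    rw [pvOfListMapInj (fun q => (w, q)) hinj, List.map_map, List.foldl_map]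
    refine (PySem.List.foldl_congr_mem _ _
        (fun (c : PySem.Dict String Int) q =>
          c.modify q 0 (· + (((l.filter (fun x => x.1 == w)).map (·.2)).count q : Int)))
        PySem.Dict.empty ?_).trans ?_
    · intro acc q _
      show acc.modify q 0 (· + (List.count (w, q) l : Int)) = _
      rw [hcnt q]
    · apply PySem.Dict.ext
      rw [pvFresh (fun q => (((l.filter (fun x => x.1 == w)).map (·.2)).count q : Int))
          (PySem.Set.ofList ((l.filter (fun x => x.1 == w)).map (·.2))) PySem.Dict.empty
          (PySem.Set.nodup_ofList _) (fun q _ => PySem.Dict.contains_empty q),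
        PySem.Dict.items_counter]
      simp
      rfl
  apply PySem.Dict.ext
  rw [PySem.Dict.items_eq_map_keys _ ndA PySem.Dict.empty]
  conv_rhs => rw [PySem.Dict.items_eq_map_keys _ ndB PySem.Dict.empty]
  rw [kA, kB]
  apply List.map_congr_left
  intro w _
  rw [vA w, pvAVal l w]


-- first maximal element of a list = first maximal element of its deduplication

theorem pvMaxDedup {α : Type} [BEq α] [LawfulBEq α] (f : α → Int) (l : List α) :
    PySem.List.max? (PySem.Set.ofList l) f = PySem.List.max? l f := by
  have hstep : ∀ (m : List α) (x : α), PySem.List.max? (m ++ [x]) f =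
      (match PySem.List.max? m f with
       | none => some x
       | some m' => if f m' < f x then some x else some m') := by
    intro m x
    show List.foldl _ none (m ++ [x]) = _
    rw [List.foldl_append]
    rfl
  induction l using List.reverseRecOn with
  | nil => rfl
  | append_singleton xs x ih =>
    rw [PySem.Set.ofList_append_singleton]
    by_cases h : x ∈ xs
    · rw [PySem.Set.add_of_mem ((PySem.Set.mem_ofList xs x).mpr h), ih, hstep]
      cases hm : PySem.List.max? xs f with
      | none =>
        rw [(PySem.List.max?_eq_none_iff _ _).mp hm] at h
        exact absurd h (by simp)
      | some m =>
        have hle := PySem.List.max?_isMax hm x h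
        simp [not_lt.mpr hle]
    · rw [PySem.Set.add_of_not_mem (fun hm => h ((PySem.Set.mem_ofList xs x).mp hm)),
        hstep, hstep, ih]

theorem pvBItems (v : String → String) :
    ∀ (l : List (String × String)) (s : PySem.Set String),
    (l.foldl (fun r wp => if r.contains wp.1 then r else r.insert wp.1 (v wp.1))
       (PySem.Dict.mk (s.map (fun w => (w, v w))))).items
      = (PySem.Set.update s (l.map (·.1))).map (fun w => (w, v w)) := by
  intro l
  induction l with
  | nil => intro s; rfl
  | cons wp t ih =>
    intro s
    rw [List.foldl_cons]
    have hc : (PySem.Dict.mk (s.map (fun w => (w, v w)))).contains wp.1 = decide (wp.1 ∈ s) := by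
      rw [PySem.Dict.contains_mk, List.any_map]
      show s.any (fun w => w == wp.1) = _
      rw [List.any_beq']
      simp []
    by_cases h : wp.1 ∈ s
    · rw [hc]
      simp only [h, decide_true, if_true]
      have hupd : PySem.Set.update s ((wp :: t).map (·.1))
          = PySem.Set.update s (t.map (·.1)) := by
        show List.foldl PySem.Set.add s (wp.1 :: t.map (·.1)) = _
        rw [List.foldl_cons, PySem.Set.add_of_mem h]
        rfl
      rw [hupd]
      exact ih s
    · rw [hc]
      simp only [h, decide_false]
      have hins : (PySem.Dict.mk (s.map (fun w => (w, v w)))).insert wp.1 (v wp.1)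
          = PySem.Dict.mk ((PySem.Set.add s wp.1).map (fun w => (w, v w))) := by
        apply PySem.Dict.ext
        rw [PySem.Dict.items_insert_of_not_contains _ _ (by rw [hc]; simp [h])]
        rw [PySem.Set.add_of_not_mem h]
        simp
      rw [hins]
      have hupd : PySem.Set.update s ((wp :: t).map (·.1))
          = PySem.Set.update (PySem.Set.add s wp.1) (t.map (·.1)) := rfl
      rw [hupd]
      exact ih (PySem.Set.add s wp.1)

-- ===== VERDICT (by name: the statement is the Claim_ definition above) =====
theorem extract_word_pos_from_tags_spec : Claim_equal_extract_word_pos_from_tags := by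
  intro pos_tags cset _
  show extract_word_pos_from_tags pos_tags cset = extract_word_pos_from_tags_alt pos_tags cset
  unfold extract_word_pos_from_tags extract_word_pos_from_tags_alt
  rw [PySem.List.foldl_ite_eq_foldl_filter (fun wp : String × String => wp.1 ∈ cset)
      (fun (d : PySem.Dict (String × String) Int) wp => d.modify wp 0 (· + 1))
      pos_tags PySem.Dict.empty,
    ← PySem.Dict.counter_eq_foldl]
  set l : List (String × String) :=
    pos_tags.filter (fun wp => decide (wp.1 ∈ cset)) with hl
  have hstep : (fun (t : PySem.Dict String (PySem.Dict String Int))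
        (x : (String × String) × Int) =>
      let t1 := if t.contains x.1.1 then t else t.insert x.1.1 PySem.Dict.empty
      t1.modify x.1.1 PySem.Dict.empty (fun c => c.modify x.1.2 0 (· + x.2)))
      = (fun t x => t.modify x.1.1 PySem.Dict.empty (fun c => c.modify x.1.2 0 (· + x.2))) := by
    funext t x
    show (if t.contains x.1.1 then t else t.insert x.1.1 PySem.Dict.empty).modify x.1.1
        PySem.Dict.empty (fun c => c.modify x.1.2 0 (· + x.2)) = _
    by_cases h : t.contains x.1.1 = true
    · rw [if_pos h]
    · rw [if_neg h]
      show (t.insert x.1.1 PySem.Dict.empty).insert x.1.1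
          ((fun c => c.modify x.1.2 0 (· + x.2))
            ((t.insert x.1.1 PySem.Dict.empty).getD x.1.1 PySem.Dict.empty)) = _
      rw [PySem.Dict.insert_insert_self, PySem.Dict.getD_insert_self]
      show _ = t.insert x.1.1
          ((fun c => c.modify x.1.2 0 (· + x.2)) (t.getD x.1.1 PySem.Dict.empty))
      rw [PySem.Dict.getD_of_not_contains t PySem.Dict.empty (eq_false_of_ne_true h)]
  simp only [hstep, pvMid]
  set T : PySem.Dict String (PySem.Dict String Int) :=
    l.foldl (fun d wp => d.modify wp.1 PySem.Dict.empty (fun c => c.modify wp.2 (0 : Int) (· + 1)))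
      PySem.Dict.empty with hT
  have ndT : T.keys.Nodup :=
    PySem.Dict.nodup_keys_foldl_modify_key l (fun wp => wp.1) PySem.Dict.empty
      (fun _ wp c => c.modify wp.2 (0 : Int) (· + 1)) PySem.Dict.empty PySem.Dict.nodup_keys_empty
  have kT : T.keys = PySem.Set.ofList (l.map (fun wp => wp.1)) := by
    have h := PySem.Dict.keys_foldl_modify_key l (fun wp => wp.1) PySem.Dict.empty
      (fun _ wp c => c.modify wp.2 (0 : Int) (· + 1)) PySem.Dict.empty
    rw [PySem.Dict.keys_empty, PySem.Set.update_nil_left] at h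
    exact h
  have hfresh := PySem.Dict.items_foldl_insert_fresh T.items (fun x => x.1)
      (fun x => ((PySem.List.sorted x.2.items (fun p => p.2) true).headD ("", 0)).1)
      PySem.Dict.empty (fun a _ => PySem.Dict.contains_empty a.1) ndT
  rw [show (PySem.Dict.empty : PySem.Dict String String).items = [] from rfl,
    List.nil_append] at hfresh
  rw [hfresh]
  have hB := pvBItems (fun w =>
      (PySem.List.max? ((l.filter (fun x => x.1 == w)).map (·.2))
        (fun p => (((l.filter (fun x => x.1 == w)).map (·.2)).count p : Int))).getD "") l []
  refine Eq.trans ?_ hB.symm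
  rw [PySem.Set.update_nil_left,
    PySem.Dict.items_eq_map_keys _ ndT PySem.Dict.empty, kT, List.map_map]
  apply List.map_congr_left
  intro w hw
  have hval : T.getD w PySem.Dict.empty
      = PySem.Dict.counter ((l.filter (fun y => y.1 == w)).map (·.2)) := by
    rw [hT]; exact pvAVal l w
  obtain ⟨p, hp, hp1⟩ := List.mem_map.mp ((PySem.Set.mem_ofList _ _).mp hw)
  have hpf : p ∈ l.filter (fun y => y.1 == w) :=
    List.mem_filter.mpr ⟨hp, by simp [hp1]⟩
  have hone : (PySem.Dict.counter ((l.filter (fun y => y.1 == w)).map (·.2))).items ≠ [] := by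
    rw [PySem.Dict.items_counter]
    intro h
    have hm := (PySem.Set.mem_ofList ((l.filter (fun y => y.1 == w)).map (·.2)) p.2).mpr
      (List.mem_map_of_mem hpf)
    rw [List.map_eq_nil_iff.mp h] at hm
    exact List.not_mem_nil hm
  show (w, ((PySem.List.sorted (T.getD w PySem.Dict.empty).items (fun p => p.2) true).headD
      ("", 0)).1) = _
  rw [hval, pvMCMax _ (PySem.Dict.nodup_keys_counter _) hone, PySem.Dict.keys_counter,
    show (fun k => (PySem.Dict.counter ((l.filter (fun y => y.1 == w)).map (·.2))).getD k 0)
      = (fun k => (((l.filter (fun y => y.1 == w)).map (·.2)).count k : Int)) from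
      funext fun k => PySem.Dict.getD_counter _ _,
    pvMaxDedup]
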